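-- pv_equiv track=rewrite | github.com/CHANCHALCHAVHAN/Company_Problem-statement-and-its-Solutions | Encrypted Chain Collapse.py | collapse_chain
-- ===== SOURCE A (Python) =====
-- def get_energy(ch):
--     if 'a' <= ch <= 'z':
--         return ord(ch) - ord('a') + 1
--     elif '0' <= ch <= '9':
--         return int(ch) * 10
--     return None
--
-- def collapse_chain(s):
--     stack = []
--
--     for ch in s:
--         energy = get_energy(ch)
--         if stack and get_energy(stack[-1]) == energy:
--             stack.pop()
--         else:
--             stack.append(ch)
--
--     return "".join(stack) if stack else "-1"
-- ===== SOURCE B (Python) =====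
-- def get_energy(ch):
--     if 'a' <= ch <= 'z':
--         return ord(ch) - ord('a') + 1
--     elif '0' <= ch <= '9':
--         return int(ch) * 10
--     return None
--
-- def collapse_chain(s):
--     chars = list(s)
--     while True:
--         for i in range(len(chars) - 1):
--             if get_energy(chars[i]) == get_energy(chars[i + 1]):
--                 del chars[i:i + 2]
--                 break
--         else:
--             break
--     return "".join(chars) if chars else "-1"
-- ===== Notes on version B (the rewrite author's own statement) =====
-- stated objective: alternative
-- what changed: Replaces A's single O(n) stack pass with a fixpoint strategy: repeatedly scan for the leftmost adjacent pair of equal-energy characters, delete it, and rescan until no pair remains.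
import Mathlib
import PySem

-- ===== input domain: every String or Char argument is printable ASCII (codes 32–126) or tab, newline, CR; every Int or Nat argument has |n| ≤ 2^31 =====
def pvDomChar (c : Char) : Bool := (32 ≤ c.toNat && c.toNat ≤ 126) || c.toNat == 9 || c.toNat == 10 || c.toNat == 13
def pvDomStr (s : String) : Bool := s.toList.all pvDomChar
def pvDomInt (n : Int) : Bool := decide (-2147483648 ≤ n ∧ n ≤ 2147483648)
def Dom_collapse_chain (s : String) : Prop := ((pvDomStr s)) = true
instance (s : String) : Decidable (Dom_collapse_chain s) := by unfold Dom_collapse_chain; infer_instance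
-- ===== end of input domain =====

-- B replaces A's one-pass stack with a repeated leftmost-pair-removal sweep run to a fixpoint
-- (a genuinely different, alternative strategy of higher cost; return values proved equal).

-- ===== PORT A =====
-- shared helper: both Pythons contain the identical get_energy
def get_energy (ch : Char) : Option Int :=
  if 'a' ≤ ch ∧ ch ≤ 'z' then some ((ch.toNat : Int) - ('a'.toNat : Int) + 1)
  else if '0' ≤ ch ∧ ch ≤ '9' then some (((ch.toNat : Int) - ('0'.toNat : Int)) * 10)
  else none

-- one iteration of A's for-loop: `if stack and get_energy(stack[-1]) == energy: pop else append`
def pvStep (st : List Char) (ch : Char) : List Char :=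
  match st.getLast? with
  | some t => if get_energy t = get_energy ch then st.dropLast else st ++ [ch]
  | none => st ++ [ch]

def collapse_chain (s : String) : String :=
  let stack := s.toList.foldl pvStep []
  if stack ≠ [] then String.ofList stack else "-1"

-- ===== PORT B =====
-- B's inner for-loop: remove the leftmost adjacent equal-energy pair, `none` if there is none
def pvSweep : List Char → Option (List Char)
  | [] => none
  | [_] => none
  | a :: b :: r =>
    if get_energy a = get_energy b then some r
    else (pvSweep (b :: r)).map (a :: ·)

-- termination measure for pvFix (cited by the port's decreasing_by)
theorem pvSweep_length : ∀ (l t : List Char), pvSweep l = some t → t.length < l.length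
  | [], t, h => by simp [pvSweep] at h
  | [a], t, h => by simp [pvSweep] at h
  | a :: b :: r, t, h => by
    by_cases hc : get_energy a = get_energy b
    · simp [pvSweep, hc] at h
      subst h; simp
    · simp [pvSweep, hc] at h
      obtain ⟨t', h', rfl⟩ := h
      have := pvSweep_length (b :: r) t' h'
      simp at this ⊢
      omega

-- B's while-loop: sweep until no pair is removed
def pvFix (l : List Char) : List Char :=
  match h : pvSweep l with
  | none => l
  | some t => pvFix t
termination_by l.length
decreasing_by exact pvSweep_length _ _ h

def collapse_chain_alt (s : String) : String :=
  let chars := pvFix s.toList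
  if chars = [] then "-1" else String.ofList chars

-- ===== PRECONDITION & SPEC =====
def Spec_collapse_chain (s : String) (out : String) : Prop := out = collapse_chain_alt s
instance (s : String) (out : String) : Decidable (Spec_collapse_chain s out) := by unfold Spec_collapse_chain; infer_instance

-- ===== CLAIM (what is proved, stated in full; the proofs are below) =====
def Claim_equal_collapse_chain : Prop := ∀ (s : String), Dom_collapse_chain s → Spec_collapse_chain s (collapse_chain s)

-- ===== LEMMAS AND PROOFS =====

def pvNE (a b : Char) : Prop := get_energy a ≠ get_energy b

theorem pvSweep_none_chain : ∀ (l : List Char), pvSweep l = none → l.IsChain pvNE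
  | [], _ => List.isChain_nil
  | [a], _ => List.isChain_singleton a
  | a :: b :: r, h => by
    by_cases hc : get_energy a = get_energy b
    · simp [pvSweep, hc] at h
    · simp [pvSweep, hc] at h
      refine List.isChain_cons.mpr ⟨fun y hy => ?_, pvSweep_none_chain (b :: r) h⟩
      have hyb : b = y := by simpa using hy
      subst hyb; exact hc

theorem pvStep_push (st : List Char) (c : Char)
    (h : ∀ x ∈ st.getLast?, pvNE x c) : pvStep st c = st ++ [c] := by
  unfold pvStep
  cases hl : st.getLast? with
  | none => rfl
  | some t =>
    have : pvNE t c := h t (by rw [hl]; rfl)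
    simp only [if_neg this]

theorem pvStep_pop (st : List Char) (a c : Char) (h : get_energy a = get_energy c) :
    pvStep (st ++ [a]) c = st := by
  unfold pvStep
  simp [h]

theorem pvFold_chain : ∀ (l st : List Char), (st ++ l).IsChain pvNE →
    List.foldl pvStep st l = st ++ l
  | [], st, _ => by simp
  | c :: r, st, h => by
    obtain ⟨h1, h2, h3⟩ := List.isChain_append.mp h
    have hpush : pvStep st c = st ++ [c] :=
      pvStep_push st c (fun x hx => h3 x hx c rfl)
    have hr : ((st ++ [c]) ++ r).IsChain pvNE := by
      rw [List.append_assoc]; simpa using h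
    calc List.foldl pvStep st (c :: r)
        = List.foldl pvStep (st ++ [c]) r := by simp [List.foldl, hpush]
      _ = (st ++ [c]) ++ r := pvFold_chain r (st ++ [c]) hr
      _ = st ++ (c :: r) := by simp

theorem pvFold_sweep : ∀ (l t st : List Char), pvSweep l = some t →
    st.IsChain pvNE → (∀ x ∈ st.getLast?, ∀ y ∈ l.head?, pvNE x y) →
    List.foldl pvStep st l = List.foldl pvStep st t
  | [], t, st, h, _, _ => by simp [pvSweep] at h
  | [a], t, st, h, _, _ => by simp [pvSweep] at h
  | a :: b :: r, t, st, h, hch, hlast => by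
    have hpush : pvStep st a = st ++ [a] :=
      pvStep_push st a (fun x hx => hlast x hx a rfl)
    by_cases hc : get_energy a = get_energy b
    · simp [pvSweep, hc] at h
      subst h
      calc List.foldl pvStep st (a :: b :: r)
          = List.foldl pvStep (pvStep (st ++ [a]) b) r := by simp [List.foldl, hpush]
        _ = List.foldl pvStep st r := by rw [pvStep_pop st a b hc]
    · simp [pvSweep, hc] at h
      obtain ⟨t', ht', rfl⟩ := h
      have hch' : (st ++ [a]).IsChain pvNE :=
        List.isChain_append.mpr ⟨hch, List.isChain_singleton a,
          fun x hx y hy => by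
            have hya : a = y := by simpa using hy
            subst hya; exact hlast x hx a rfl⟩
      have hlast' : ∀ x ∈ (st ++ [a]).getLast?, ∀ y ∈ (b :: r).head?, pvNE x y := by
        intro x hx y hy
        have hxa : a = x := by simpa [List.getLast?_concat] using hx
        have hyb : b = y := by simpa using hy
        subst hxa; subst hyb; exact hc
      calc List.foldl pvStep st (a :: b :: r)
          = List.foldl pvStep (st ++ [a]) (b :: r) := by simp [List.foldl, hpush]
        _ = List.foldl pvStep (st ++ [a]) t' := pvFold_sweep (b :: r) t' (st ++ [a]) ht' hch' hlast'
        _ = List.foldl pvStep st (a :: t') := by simp [List.foldl, hpush]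

theorem pvFold_eq_pvFix (l : List Char) : List.foldl pvStep [] l = pvFix l := by
  cases h : pvSweep l with
  | none =>
    rw [pvFix, h]
    simpa using pvFold_chain l [] (by simpa using pvSweep_none_chain l h)
  | some t =>
    rw [pvFix, h]
    have h1 := pvFold_sweep l t [] h List.isChain_nil (by simp)
    rw [h1]
    exact pvFold_eq_pvFix t
termination_by l.length
decreasing_by exact pvSweep_length _ _ h

-- ===== VERDICT (by name: the statement is the Claim_ definition above) =====
theorem collapse_chain_spec : Claim_equal_collapse_chain := by
  intro s _
  unfold Spec_collapse_chain collapse_chain collapse_chain_alt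
  rw [pvFold_eq_pvFix]
  by_cases h : pvFix s.toList = [] <;> simp [h]
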